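-- pv_equiv track=rewrite | github.com/mohammad-rowshan/directional_qLDPC_codes | dir_codes_numerics.py | route_offsets
-- ===== SOURCE A (Python) =====
-- from typing import Dict, Iterable, List, Optional, Sequence, Tuple
--
-- DIR_VECS: Dict[str, Tuple[int, int]] = {
--     "N": (0, 1),
--     "E": (1, 0),
--     "S": (0, -1),
--     "W": (-1, 0),
-- }
--
-- def route_offsets(word_dirs: Sequence[str]) -> List[Tuple[int, int]]:
--     """
--     Compute offsets Q_j = S_{j-1}+S_j for the expanded word (square-grid).
--     Offsets are integer vectors in Z^2.
--     """
--     S_prev = (0, 0)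
--     S = (0, 0)
--     offsets: List[Tuple[int, int]] = []
--     for d in word_dirs:
--         dx, dy = DIR_VECS[d]
--         S = (S[0] + dx, S[1] + dy)
--         Q = (S_prev[0] + S[0], S_prev[1] + S[1])
--         offsets.append(Q)
--         S_prev = S
--     return offsets
-- ===== SOURCE B (Python) =====
-- DIR_VECS = {
--     "N": (0, 1),
--     "E": (1, 0),
--     "S": (0, -1),
--     "W": (-1, 0),
-- }
--
-- def route_offsets(word_dirs):
--     # Pass 1: prefix-position table P, P[k] = sum of first k direction vectors.
--     P = [(0, 0)]
--     for d in word_dirs: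
--         vx, vy = DIR_VECS[d]
--         x, y = P[-1]
--         P.append((x + vx, y + vy))
--     # Pass 2: sum each adjacent pair.
--     return [(p[0] + q[0], p[1] + q[1]) for p, q in zip(P, P[1:])]
-- ===== Notes on version B (the rewrite author's own statement) =====
-- stated objective: alternative
-- what changed: B builds the full prefix-position table in one pass and then produces each offset by summing adjacent table entries with zip in a separate second pass, instead of A's fused single loop carrying S_prev/S running state.
import Mathlib
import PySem

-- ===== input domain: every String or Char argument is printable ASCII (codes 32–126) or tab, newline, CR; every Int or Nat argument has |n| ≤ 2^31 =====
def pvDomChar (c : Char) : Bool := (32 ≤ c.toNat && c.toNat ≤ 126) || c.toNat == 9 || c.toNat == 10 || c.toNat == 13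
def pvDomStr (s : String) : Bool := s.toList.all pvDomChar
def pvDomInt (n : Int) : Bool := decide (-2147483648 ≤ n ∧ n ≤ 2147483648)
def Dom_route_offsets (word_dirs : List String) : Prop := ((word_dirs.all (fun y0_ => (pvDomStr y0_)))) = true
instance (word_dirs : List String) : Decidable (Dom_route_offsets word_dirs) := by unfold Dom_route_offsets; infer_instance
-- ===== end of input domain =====

-- B builds a prefix-position table then sums adjacent pairs, instead of A's fused
-- single loop carrying S_prev/S running state (objective: alternative decomposition).

-- ===== PORT A =====
-- DIR_VECS, the module dict (insertion order N,E,S,W)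
def DIR_VECS : PySem.Dict String (Int × Int) :=
  PySem.Dict.ofList [("N", (0, 1)), ("E", (1, 0)), ("S", (0, -1)), ("W", (-1, 0))]

-- A's loop over state (S_prev, S, offsets); DIR_VECS[d] raising KeyError (get? = none)
-- is excluded by Pre_route_offsets; the .getD (0,0) default is never reached there.
def route_offsets (word_dirs : List String) : List (Int × Int) :=
  (word_dirs.foldl
    (fun (st : (Int × Int) × (Int × Int) × List (Int × Int)) d =>
      let Sprev := st.1
      let S := st.2.1
      let offs := st.2.2
      let v := (DIR_VECS.get? d).getD (0, 0)
      let S' := (S.1 + v.1, S.2 + v.2)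
      let Q := (Sprev.1 + S'.1, Sprev.2 + S'.2)
      (S', S', offs ++ [Q]))
    ((0, 0), (0, 0), [])).2.2

-- ===== PORT B =====
-- Pass 1: the prefix-position table P (P[-1] = getLastD; appends only, so never empty).
def routeTable (word_dirs : List String) : List (Int × Int) :=
  word_dirs.foldl
    (fun (P : List (Int × Int)) d =>
      let v := (DIR_VECS.get? d).getD (0, 0)
      let last := P.getLastD (0, 0)
      P ++ [(last.1 + v.1, last.2 + v.2)])
    [(0, 0)]

-- Pass 2: zip(P, P[1:]) and sum each adjacent pair.
def route_offsets_alt (word_dirs : List String) : List (Int × Int) :=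
  let P := routeTable word_dirs
  (P.zip P.tail).map (fun pq => (pq.1.1 + pq.2.1, pq.1.2 + pq.2.2))

-- ===== PRECONDITION & SPEC =====
-- Pre_ excludes inputs containing a direction outside {N,E,S,W}, on which A raises KeyError
-- (B raises KeyError there too).
def Pre_route_offsets (word_dirs : List String) : Prop :=
  (word_dirs.all (fun d => d == "N" || d == "E" || d == "S" || d == "W")) = true
instance (word_dirs : List String) : Decidable (Pre_route_offsets word_dirs) := by
  unfold Pre_route_offsets; infer_instance

def pvWitness_route_offsets : List String := ["N", "N", "E", "S"]

def Spec_route_offsets (word_dirs : List String) (out : List (Int × Int)) : Prop := out = route_offsets_alt word_dirs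
instance (word_dirs : List String) (out : List (Int × Int)) : Decidable (Spec_route_offsets word_dirs out) := by unfold Spec_route_offsets; infer_instance

-- ===== CLAIM (what is proved, stated in full; the proofs are below) =====
def Claim_equal_route_offsets : Prop := ∀ (word_dirs : List String), Dom_route_offsets word_dirs → Pre_route_offsets word_dirs → Spec_route_offsets word_dirs (route_offsets word_dirs)

-- ===== LEMMAS AND PROOFS =====

-- The chain of positions starting at s (shared abstraction for the two loop invariants).
def positions (s : Int × Int) : List String → List (Int × Int)
  | [] => []
  | d :: ds =>
    let v := (DIR_VECS.get? d).getD (0, 0)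
    let s' := (s.1 + v.1, s.2 + v.2)
    s' :: positions s' ds

-- B's pass-1 invariant: the accumulator is always (prefix ++ [last position]).
theorem routeTable_inv (ds : List String) :
    ∀ (l : List (Int × Int)) (s : Int × Int),
      ds.foldl
        (fun (P : List (Int × Int)) d =>
          let v := (DIR_VECS.get? d).getD (0, 0)
          let last := P.getLastD (0, 0)
          P ++ [(last.1 + v.1, last.2 + v.2)])
        (l ++ [s]) = (l ++ [s]) ++ positions s ds := by
  induction ds with
  | nil => intro l s; simp [positions]
  | cons d ds ih =>
    intro l s
    simp only [List.foldl_cons]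
    have h1 : (l ++ [s]).getLastD (0, 0) = s := by simp
    simp only [h1]
    rw [ih (l ++ [s])]
    simp [positions]

-- A's loop invariant (S_prev = S = s on entry): offsets = acc ++ adjacent-pair sums
-- of the position chain s :: positions s ds.
theorem routeA_inv (ds : List String) :
    ∀ (s : Int × Int) (acc : List (Int × Int)),
      (ds.foldl
        (fun (st : (Int × Int) × (Int × Int) × List (Int × Int)) d =>
          let Sprev := st.1
          let S := st.2.1
          let offs := st.2.2
          let v := (DIR_VECS.get? d).getD (0, 0)
          let S' := (S.1 + v.1, S.2 + v.2)
          let Q := (Sprev.1 + S'.1, Sprev.2 + S'.2)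
          (S', S', offs ++ [Q]))
        (s, s, acc)).2.2 =
      acc ++ (((s :: positions s ds).zip (positions s ds)).map
        (fun pq => (pq.1.1 + pq.2.1, pq.1.2 + pq.2.2))) := by
  induction ds with
  | nil => intro s acc; simp [positions]
  | cons d ds ih =>
    intro s acc
    simp only [List.foldl_cons, positions, List.zip_cons_cons, List.map_cons]
    rw [ih]
    simp

-- ===== VERDICT (by name: the statement is the Claim_ definition above) =====
theorem route_offsets_spec : Claim_equal_route_offsets := by
  intro word_dirs _ _
  unfold Spec_route_offsets route_offsets route_offsets_alt routeTable
  rw [routeA_inv]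
  have h := routeTable_inv word_dirs [] ((0, 0) : Int × Int)
  simp only [List.nil_append] at h
  rw [h]
  simp
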